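-- pv_equiv track=rewrite | github.com/ZedzDed23/Echoes-Of-The-Shardlands | src/world_gen.py | get_enemy_abilities
-- ===== SOURCE A (Python) =====
-- from typing import Dict, List, Optional, Tuple
--
-- def get_enemy_abilities(enemy_type: str, difficulty: int) -> List[str]:
--     """Get special abilities for an enemy based on type and difficulty."""
--     base_abilities = {
--         'Shard Golem': ['attack'],  # Tank
--         'Crystal Spider': ['attack'],  # Glass cannon
--         'Shadow Wraith': ['attack'],  # Balanced damage
--         'Memory Eater': ['attack'],  # Balanced+
--         'Void Stalker': ['attack'],  # Strong all around
--     }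
--
--     # Special abilities unlocked at higher difficulties
--     special_abilities = {
--         'Shard Golem': {
--             3: ['attack', 'shield'],  # Gains temporary defense boost
--             5: ['attack', 'shield', 'regenerate'],  # Heals over time
--         },
--         'Crystal Spider': {
--             3: ['attack', 'double_strike'],  # Two attacks in one turn
--             5: ['attack', 'double_strike', 'poison'],  # DoT effect
--         },
--         'Shadow Wraith': {
--             3: ['attack', 'life_drain'],  # Damage + self heal
--             5: ['attack', 'life_drain', 'curse'],  # Reduces player defense
--         },
--         'Memory Eater': {
--             3: ['attack', 'confuse'],  # Chance to make player miss
--             5: ['attack', 'confuse', 'mind_blast'],  # High damage skill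
--         },
--         'Void Stalker': {
--             3: ['attack', 'void_strike'],  # Ignores some defense
--             5: ['attack', 'void_strike', 'darkness'],  # Reduces player accuracy
--         }
--     }
--
--     # Get the highest tier of abilities unlocked at current difficulty
--     abilities = base_abilities[enemy_type].copy()
--     for diff_req, diff_abilities in special_abilities[enemy_type].items():
--         if difficulty >= diff_req:
--             abilities = diff_abilities.copy()
--
--     return abilities
-- ===== SOURCE B (Python) =====
-- # B: closed-form tier arithmetic, no loop: a slice prefix of the full ability list for the type.
-- SPECIALS = {
--     'Shard Golem': ('shield', 'regenerate'),
--     'Crystal Spider': ('double_strike', 'poison'),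
--     'Shadow Wraith': ('life_drain', 'curse'),
--     'Memory Eater': ('confuse', 'mind_blast'),
--     'Void Stalker': ('void_strike', 'darkness'),
-- }
--
-- def get_enemy_abilities(enemy_type: str, difficulty: int):
--     first, second = SPECIALS[enemy_type]   # KeyError on unknown types, like A
--     tier = (difficulty >= 3) + (difficulty >= 5)
--     return ['attack', first, second][: 1 + tier]
-- ===== Notes on version B (the rewrite author's own statement) =====
-- stated objective: simpler
-- what changed: Replaces A's per-tier full ability lists overwritten in a dict-iteration loop with a single (first,second) specials tuple per type, a closed-form tier count from the two threshold comparisons, and a prefix slice of the full ability list — no loop at all.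
import Mathlib
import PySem

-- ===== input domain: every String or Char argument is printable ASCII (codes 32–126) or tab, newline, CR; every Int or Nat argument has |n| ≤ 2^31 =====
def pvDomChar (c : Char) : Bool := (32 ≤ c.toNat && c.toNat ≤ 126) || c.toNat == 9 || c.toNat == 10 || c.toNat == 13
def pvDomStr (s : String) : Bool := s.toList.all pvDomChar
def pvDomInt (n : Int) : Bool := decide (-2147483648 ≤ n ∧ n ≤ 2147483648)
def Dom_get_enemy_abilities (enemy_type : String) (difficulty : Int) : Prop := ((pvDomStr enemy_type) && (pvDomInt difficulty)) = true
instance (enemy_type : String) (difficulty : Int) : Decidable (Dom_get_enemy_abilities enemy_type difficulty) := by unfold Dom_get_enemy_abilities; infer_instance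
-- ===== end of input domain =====

-- B replaces A's tiered-list overwrite loop by a closed-form tier count and a prefix slice; same return value on the five known enemy types.
-- ===== PORT A =====
-- A's two literal dicts, built in insertion order as in the Python source.
def pvBaseA : PySem.Dict String (List String) :=
  (((((PySem.Dict.empty).insert "Shard Golem" ["attack"]).insert "Crystal Spider" ["attack"]).insert
      "Shadow Wraith" ["attack"]).insert "Memory Eater" ["attack"]).insert "Void Stalker" ["attack"]

def pvSpecialA : PySem.Dict String (PySem.Dict Int (List String)) :=
  (((((PySem.Dict.empty.insert "Shard Golem"
        ((PySem.Dict.empty.insert 3 ["attack", "shield"]).insert 5 ["attack", "shield", "regenerate"])).insert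
      "Crystal Spider"
        ((PySem.Dict.empty.insert 3 ["attack", "double_strike"]).insert 5 ["attack", "double_strike", "poison"])).insert
      "Shadow Wraith"
        ((PySem.Dict.empty.insert 3 ["attack", "life_drain"]).insert 5 ["attack", "life_drain", "curse"])).insert
      "Memory Eater"
        ((PySem.Dict.empty.insert 3 ["attack", "confuse"]).insert 5 ["attack", "confuse", "mind_blast"])).insert
      "Void Stalker"
        ((PySem.Dict.empty.insert 3 ["attack", "void_strike"]).insert 5 ["attack", "void_strike", "darkness"]))

-- base_abilities[enemy_type] / special_abilities[enemy_type] raise KeyError on unknown types: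
-- get? = none there; Pre_ excludes those inputs, the [] default is never reached under Pre_.
def get_enemy_abilities (enemy_type : String) (difficulty : Int) : List String :=
  let abilities := ((pvBaseA.get? enemy_type).getD [])
  ((pvSpecialA.get? enemy_type).getD PySem.Dict.empty).items.foldl
    (fun abilities p =>
      if difficulty ≥ p.1 then p.2 else abilities)
    abilities

-- ===== PORT B =====
def pvSpecialsB : PySem.Dict String (String × String) :=
  ((((PySem.Dict.empty.insert "Shard Golem" ("shield", "regenerate")).insert
      "Crystal Spider" ("double_strike", "poison")).insert
      "Shadow Wraith" ("life_drain", "curse")).insert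
      "Memory Eater" ("confuse", "mind_blast")).insert
      "Void Stalker" ("void_strike", "darkness")

-- SPECIALS[enemy_type] raises KeyError on unknown types (get? = none; the default is never reached under Pre_);
-- the Python bools (difficulty >= 3) + (difficulty >= 5) become 0/1 integers, and [:1+tier] is PySem.List.slice.
def get_enemy_abilities_alt (enemy_type : String) (difficulty : Int) : List String :=
  let p := (pvSpecialsB.get? enemy_type).getD ("", "")
  let tier : Int := (if difficulty ≥ 3 then 1 else 0) + (if difficulty ≥ 5 then 1 else 0)
  PySem.List.slice ["attack", p.1, p.2] none (some (1 + tier))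

-- ===== PRECONDITION & SPEC =====
-- Pre_ admits exactly the five enemy types A's dicts contain; on any other type A raises KeyError.
def Pre_get_enemy_abilities (enemy_type : String) (difficulty : Int) : Prop :=
  enemy_type = "Shard Golem" ∨ enemy_type = "Crystal Spider" ∨ enemy_type = "Shadow Wraith" ∨
  enemy_type = "Memory Eater" ∨ enemy_type = "Void Stalker"
instance (enemy_type : String) (difficulty : Int) : Decidable (Pre_get_enemy_abilities enemy_type difficulty) := by
  unfold Pre_get_enemy_abilities; infer_instance

def pvWitness_get_enemy_abilities : String × Int := ("Shard Golem", 3)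

def Spec_get_enemy_abilities (enemy_type : String) (difficulty : Int) (out : List String) : Prop := out = get_enemy_abilities_alt enemy_type difficulty
instance (enemy_type : String) (difficulty : Int) (out : List String) : Decidable (Spec_get_enemy_abilities enemy_type difficulty out) := by unfold Spec_get_enemy_abilities; infer_instance

-- ===== CLAIM (what is proved, stated in full; the proofs are below) =====
def Claim_equal_get_enemy_abilities : Prop := ∀ (enemy_type : String) (difficulty : Int), Dom_get_enemy_abilities enemy_type difficulty → Pre_get_enemy_abilities enemy_type difficulty → Spec_get_enemy_abilities enemy_type difficulty (get_enemy_abilities enemy_type difficulty)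

-- ===== LEMMAS AND PROOFS =====

-- ===== VERDICT (by name: the statement is the Claim_ definition above) =====
theorem get_enemy_abilities_spec : Claim_equal_get_enemy_abilities := by
  intro t d _ hpre
  unfold Spec_get_enemy_abilities
  rcases hpre with h | h | h | h | h <;> subst h <;>
    simp only [get_enemy_abilities, get_enemy_abilities_alt,
      show pvBaseA.get? "Shard Golem" = some ["attack"] from rfl,
      show pvBaseA.get? "Crystal Spider" = some ["attack"] from rfl,
      show pvBaseA.get? "Shadow Wraith" = some ["attack"] from rfl,
      show pvBaseA.get? "Memory Eater" = some ["attack"] from rfl,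
      show pvBaseA.get? "Void Stalker" = some ["attack"] from rfl,
      show ((pvSpecialA.get? "Shard Golem").getD PySem.Dict.empty).items = [((3:Int), ["attack", "shield"]), (5, ["attack", "shield", "regenerate"])] from rfl,
      show ((pvSpecialA.get? "Crystal Spider").getD PySem.Dict.empty).items = [((3:Int), ["attack", "double_strike"]), (5, ["attack", "double_strike", "poison"])] from rfl,
      show ((pvSpecialA.get? "Shadow Wraith").getD PySem.Dict.empty).items = [((3:Int), ["attack", "life_drain"]), (5, ["attack", "life_drain", "curse"])] from rfl,
      show ((pvSpecialA.get? "Memory Eater").getD PySem.Dict.empty).items = [((3:Int), ["attack", "confuse"]), (5, ["attack", "confuse", "mind_blast"])] from rfl,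
      show ((pvSpecialA.get? "Void Stalker").getD PySem.Dict.empty).items = [((3:Int), ["attack", "void_strike"]), (5, ["attack", "void_strike", "darkness"])] from rfl,
      show pvSpecialsB.get? "Shard Golem" = some ("shield", "regenerate") from rfl,
      show pvSpecialsB.get? "Crystal Spider" = some ("double_strike", "poison") from rfl,
      show pvSpecialsB.get? "Shadow Wraith" = some ("life_drain", "curse") from rfl,
      show pvSpecialsB.get? "Memory Eater" = some ("confuse", "mind_blast") from rfl,
      show pvSpecialsB.get? "Void Stalker" = some ("void_strike", "darkness") from rfl,
      Option.getD_some, List.foldl] <;>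
    split_ifs with h1 h2 <;>
    simp_all [PySem.List.slice] <;> omega
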